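-- pv_equiv track=rewrite | github.com/Nino-Dzidzi/python_excercises | exercise8.py | gadmomeciricxvi
-- ===== SOURCE A (Python) =====
-- def gadmomeciricxvi(num):
--   carieli_listi = []
--   for i in range (1,num):
--     if i % 3 == 0:
--       carieli_listi.append(i)
--     elif i % 5 == 0:
--       carieli_listi.append(i)
--   return carieli_listi
-- ===== SOURCE B (Python) =====
-- def gadmomeciricxvi(num):
--   return sorted(set(range(3, num, 3)) | set(range(5, num, 5)))
-- ===== Notes on version B (the rewrite author's own statement) =====
-- stated objective: idiomatic
-- what changed: Instead of scanning every integer in [1,num) and testing i%3 and i%5, B generates the two arithmetic progressions range(3,num,3) and range(5,num,5) directly, takes their set union to drop duplicate multiples of 15, and sorts; the per-element divisibility loop disappears.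
import Mathlib
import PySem

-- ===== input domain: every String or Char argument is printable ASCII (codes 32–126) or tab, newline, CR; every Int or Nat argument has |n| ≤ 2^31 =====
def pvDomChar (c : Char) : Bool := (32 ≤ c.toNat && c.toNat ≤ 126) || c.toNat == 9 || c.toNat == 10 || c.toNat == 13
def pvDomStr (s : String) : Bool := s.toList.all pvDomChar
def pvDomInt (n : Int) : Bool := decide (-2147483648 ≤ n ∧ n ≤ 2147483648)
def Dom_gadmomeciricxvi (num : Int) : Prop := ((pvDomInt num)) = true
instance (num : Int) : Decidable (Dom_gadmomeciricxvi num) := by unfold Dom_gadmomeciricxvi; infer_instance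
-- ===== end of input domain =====

-- B replaces A's scan-and-test of every integer in [1,num) by directly generating the
-- multiples of 3 and of 5 as arithmetic ranges, uniting them as a set and sorting (idiomatic).

-- ===== PORT A =====
def gadmomeciricxvi (num : Int) : List Int :=
  (PySem.List.pyRange 1 num 1).foldl (fun carieli_listi i =>
    if PySem.Int.mod i 3 = 0 then carieli_listi ++ [i]
    else if PySem.Int.mod i 5 = 0 then carieli_listi ++ [i]
    else carieli_listi) []

-- ===== PORT B =====
def gadmomeciricxvi_alt (num : Int) : List Int :=
  PySem.List.sorted
    (PySem.Set.union (PySem.Set.ofList (PySem.List.pyRange 3 num 3))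
                     (PySem.Set.ofList (PySem.List.pyRange 5 num 5)))
    (fun x => x) false

-- ===== PRECONDITION & SPEC =====
def Spec_gadmomeciricxvi (num : Int) (out : List Int) : Prop := out = gadmomeciricxvi_alt num
instance (num : Int) (out : List Int) : Decidable (Spec_gadmomeciricxvi num out) := by unfold Spec_gadmomeciricxvi; infer_instance

-- ===== CLAIM (what is proved, stated in full; the proofs are below) =====
def Claim_equal_gadmomeciricxvi : Prop := ∀ (num : Int), Dom_gadmomeciricxvi num → Spec_gadmomeciricxvi num (gadmomeciricxvi num)

-- ===== LEMMAS AND PROOFS =====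

-- A's loop is the filter of [1,num) by "divisible by 3 or by 5".
theorem gadA_eq_filter (num : Int) :
    gadmomeciricxvi num
      = (PySem.List.pyRange 1 num 1).filter
          (fun i => decide (PySem.Int.mod i 3 = 0 ∨ PySem.Int.mod i 5 = 0)) := by
  unfold gadmomeciricxvi
  rw [PySem.List.foldl_congr_mem (PySem.List.pyRange 1 num 1) _
      (fun acc i => if PySem.Int.mod i 3 = 0 ∨ PySem.Int.mod i 5 = 0 then acc ++ [i] else acc) []
      (by intro acc i _; beta_reduce; split_ifs <;> tauto)]
  simpa using PySem.List.foldl_append_ite_eq_filter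
      (fun i => PySem.Int.mod i 3 = 0 ∨ PySem.Int.mod i 5 = 0)
      (PySem.List.pyRange 1 num 1) []

theorem gadmomeciricxvi_spec' (num : Int) :
    gadmomeciricxvi num = gadmomeciricxvi_alt num := by
  unfold gadmomeciricxvi_alt
  rw [PySem.List.sorted_eq_of_perm_of_pairwise_lt _
        ((PySem.List.pyRange 1 num 1).filter
          (fun i => decide (PySem.Int.mod i 3 = 0 ∨ PySem.Int.mod i 5 = 0)))
        (fun x => x) ?_ ?_]
  · exact gadA_eq_filter num
  · -- same members, both without duplicates ⇒ a permutation
    refine (List.perm_ext_iff_of_nodup ((PySem.List.nodup_pyRange_one 1 num).filter _)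
        (PySem.Set.nodup_union _ _ (PySem.Set.nodup_ofList _))).mpr ?_
    intro x
    rw [List.mem_filter, PySem.Set.mem_union, PySem.Set.mem_ofList, PySem.Set.mem_ofList,
        PySem.List.mem_pyRange_one, PySem.List.mem_pyRange_iff_of_pos (by norm_num),
        PySem.List.mem_pyRange_iff_of_pos (by norm_num)]
    simp only [decide_eq_true_eq, PySem.Int.mod_eq_zero_iff_dvd]
    omega
  · exact (PySem.List.pairwise_lt_pyRange_one 1 num).filter _

-- ===== VERDICT (by name: the statement is the Claim_ definition above) =====
theorem gadmomeciricxvi_spec : Claim_equal_gadmomeciricxvi := by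
  intro num _
  unfold Spec_gadmomeciricxvi
  exact gadmomeciricxvi_spec' num
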